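-- pv_equiv track=rewrite | github.com/Denis-Svec/lrs | map3d.py | thicken_collision_points
-- ===== SOURCE A (Python) =====
-- import copy
--
-- def thicken_collision_points(pixel_data, radius=2):
--     # Make a deep copy of the input data to avoid modifying it directly
--     thickened_data = copy.deepcopy(pixel_data)
--
--     height = len(pixel_data)
--     width = len(pixel_data[0]) if height > 0 else 0
--
--     modified_points = 0  # Counter to see how many points are modified
--
--     for i in range(height):
--         for j in range(width):
--             if pixel_data[i][j] == '#':  # Checking for collision character
--                 # Loop through the neighborhood defined by the radius
--                 for x in range(-radius, radius + 1):
--                     for y in range(-radius, radius + 1):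
--                         new_i = i + x
--                         new_j = j + y
--
--                         # Check if the new_i and new_j indices are valid
--                         if 0 <= new_i < height and 0 <= new_j < width:
--                             if thickened_data[new_i][new_j] != '#':  # Check if the point hasn't been modified before
--                                 thickened_data[new_i][new_j] = '#'  # Modify the pixel to represent collision
--                                 modified_points += 1
--
--
--     return thickened_data
-- ===== SOURCE B (Python) =====
-- def thicken_collision_points(pixel_data, radius=2):
--     # Separable square dilation: one horizontal sliding-window pass per row,
--     # then one vertical pass over the per-row hit masks.
--     height = len(pixel_data)
--     width = len(pixel_data[0]) if height > 0 else 0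
--     row_hits = [[any(row[k] == '#' for k in range(max(0, j - radius), min(width, j + radius + 1)))
--                  for j in range(width)]
--                 for row in pixel_data]
--     return [['#' if any(row_hits[k][j] for k in range(max(0, i - radius), min(height, i + radius + 1)))
--              else row[j] for j in range(width)]
--             for i, row in enumerate(pixel_data)]
-- ===== Notes on version B (the rewrite author's own statement) =====
-- stated objective: alternative
-- what changed: A scatters: for every '#' source it stamps the whole (2r+1)x(2r+1) square into a mutated copy; B gathers with a separable two-pass dilation (horizontal clamped-window pass per row, then a vertical pass over the row hit masks). Pre_ restricts to rectangular grids, the natural domain of a pixel dilation: A raises IndexError when a row is shorter than row 0, and on rows longer than row 0 the corner is unspecified and either value is defensible (A keeps the tail beyond the processed width, B returns just the processed width-column region).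
-- outside the precondition, e.g. on thicken_collision_points([['#'], ['.', 'x']], 1): A returns [['#'], ['#', 'x']], B returns [['#'], ['#']]
import Mathlib
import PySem

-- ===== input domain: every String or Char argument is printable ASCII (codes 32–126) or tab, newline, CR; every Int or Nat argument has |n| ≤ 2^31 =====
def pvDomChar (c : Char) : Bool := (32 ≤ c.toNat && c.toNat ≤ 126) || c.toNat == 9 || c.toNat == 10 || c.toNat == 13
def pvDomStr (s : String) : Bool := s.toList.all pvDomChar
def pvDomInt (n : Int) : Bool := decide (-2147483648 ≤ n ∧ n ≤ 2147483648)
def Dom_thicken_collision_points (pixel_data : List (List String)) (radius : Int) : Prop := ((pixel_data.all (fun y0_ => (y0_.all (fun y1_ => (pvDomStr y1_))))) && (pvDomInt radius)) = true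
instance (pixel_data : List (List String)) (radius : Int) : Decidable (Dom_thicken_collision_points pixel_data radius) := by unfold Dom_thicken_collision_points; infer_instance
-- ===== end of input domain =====

-- B replaces A's per-source square stamping into a mutated copy by a separable
-- two-pass (horizontal window per row, then vertical over the row masks) dilation.

-- ===== PORT A =====
def thicken_collision_points (pixel_data : List (List String)) (radius : Int) : List (List String) :=
  let height : Int := (pixel_data.length : Int)
  let width : Int := if pixel_data.length > 0 then ((PySem.List.pyGetD pixel_data 0 []).length : Int) else 0
  ((PySem.List.pyRange 0 height 1).foldl (fun st i =>
    (PySem.List.pyRange 0 width 1).foldl (fun st j =>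
      if PySem.List.pyGetD (PySem.List.pyGetD pixel_data i []) j "" = "#" then
        (PySem.List.pyRange (-radius) (radius + 1) 1).foldl (fun st x =>
          (PySem.List.pyRange (-radius) (radius + 1) 1).foldl (fun st y =>
            let new_i := i + x
            let new_j := j + y
            if 0 ≤ new_i ∧ new_i < height ∧ 0 ≤ new_j ∧ new_j < width then
              if PySem.List.pyGetD (PySem.List.pyGetD st.1 new_i []) new_j "" ≠ "#" then
                (st.1.modify new_i.toNat (fun row => row.set new_j.toNat "#"), st.2 + 1)
              else st
            else st) st) st
      else st) st) ((pixel_data, (0 : Int)) : List (List String) × Int)).1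

-- ===== PORT B =====
def thicken_collision_points_alt (pixel_data : List (List String)) (radius : Int) : List (List String) :=
  let height : Int := (pixel_data.length : Int)
  let width : Int := if pixel_data.length > 0 then ((PySem.List.pyGetD pixel_data 0 []).length : Int) else 0
  let row_hits : List (List Bool) := pixel_data.map (fun row =>
    (PySem.List.pyRange 0 width 1).map (fun j =>
      (PySem.List.pyRange (max 0 (j - radius)) (min width (j + radius + 1)) 1).any
        (fun k => PySem.List.pyGetD row k "" == "#")))
  (PySem.List.enumerate pixel_data 0).map (fun p =>
    (PySem.List.pyRange 0 width 1).map (fun j =>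
      if (PySem.List.pyRange (max 0 (p.1 - radius)) (min height (p.1 + radius + 1)) 1).any
          (fun k => PySem.List.pyGetD (PySem.List.pyGetD row_hits k []) j false) then "#"
      else PySem.List.pyGetD p.2 j ""))

-- ===== PRECONDITION & SPEC =====
-- Pre_ restricts to rectangular grids, the natural domain of a pixel dilation:
-- A raises IndexError when a row is shorter than row 0, and on a row longer than
-- row 0 no behaviour is specified and either value is defensible (A keeps the tail
-- beyond the processed width, B returns just the processed width-column region).
def Pre_thicken_collision_points (pixel_data : List (List String)) (radius : Int) : Prop :=
  ∀ row ∈ pixel_data, row.length = (pixel_data.headD []).length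
instance (pixel_data : List (List String)) (radius : Int) : Decidable (Pre_thicken_collision_points pixel_data radius) := by unfold Pre_thicken_collision_points; infer_instance

def pvWitness_thicken_collision_points : List (List String) × Int := ([["#", "."], [".", "."]], 1)

def Spec_thicken_collision_points (pixel_data : List (List String)) (radius : Int) (out : List (List String)) : Prop := out = thicken_collision_points_alt pixel_data radius
instance (pixel_data : List (List String)) (radius : Int) (out : List (List String)) : Decidable (Spec_thicken_collision_points pixel_data radius out) := by unfold Spec_thicken_collision_points; infer_instance

-- ===== CLAIM (what is proved, stated in full; the proofs are below) =====
def Claim_equal_thicken_collision_points : Prop := ∀ (pixel_data : List (List String)) (radius : Int), Dom_thicken_collision_points pixel_data radius → Pre_thicken_collision_points pixel_data radius → Spec_thicken_collision_points pixel_data radius (thicken_collision_points pixel_data radius)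

-- ===== LEMMAS AND PROOFS =====

-- width of the processed region (= len(row 0), 0 for the empty grid)
def tcW (pd : List (List String)) : Nat := (pd.headD []).length

-- total 2-D read used by the proofs
def gget (g : List (List String)) (a b : Nat) : String := (g.getD a []).getD b ""

-- "g has the same shape as pd"
def Shp (pd g : List (List String)) : Prop :=
  g.length = pd.length ∧ ∀ k : Nat, (g.getD k []).length = (pd.getD k []).length

-- some '#' of the processed region lies within Chebyshev distance r of cell (a, b)
def hitNearB (pd : List (List String)) (r : Int) (a b : Nat) : Bool :=
  (List.range pd.length).any (fun p => (List.range (tcW pd)).any (fun q =>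
    (gget pd p q == "#") && decide (-r ≤ (a : Int) - p) && decide ((a : Int) - p ≤ r) &&
    decide (-r ≤ (b : Int) - q) && decide ((b : Int) - q ≤ r)))

lemma hitNearB_iff (pd : List (List String)) (r : Int) (a b : Nat) :
    hitNearB pd r a b = true ↔ ∃ p q : Nat, p < pd.length ∧ q < tcW pd ∧ gget pd p q = "#" ∧
      -r ≤ (a : Int) - p ∧ (a : Int) - p ≤ r ∧ -r ≤ (b : Int) - q ∧ (b : Int) - q ≤ r := by
  simp only [hitNearB, List.any_eq_true, List.mem_range, Bool.and_eq_true, beq_iff_eq,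
    decide_eq_true_eq]
  constructor
  · rintro ⟨p, hp, q, hq, ⟨⟨⟨⟨h1, h2⟩, h3⟩, h4⟩, h5⟩⟩; exact ⟨p, q, hp, hq, h1, h2, h3, h4, h5⟩
  · rintro ⟨p, q, hp, hq, h1, h2, h3, h4, h5⟩; exact ⟨p, hp, q, hq, ⟨⟨⟨⟨h1, h2⟩, h3⟩, h4⟩, h5⟩⟩

-- the common pointwise condition: cell inside the processed region and near a '#'
def tcCond (pd : List (List String)) (r : Int) (a b : Nat) : Bool :=
  decide (a < pd.length) && decide (b < tcW pd) && hitNearB pd r a b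

lemma foldl_fst {α β γ : Type} (L : List α) (step : β × γ → α → β × γ) (F : β → α → β)
    (h : ∀ st x, (step st x).1 = F st.1 x) :
    ∀ p : β × γ, (L.foldl step p).1 = L.foldl F p.1 := by
  induction L with
  | nil => intro p; rfl
  | cons x L ih => intro p; rw [List.foldl_cons, List.foldl_cons, ih, h]

lemma foldl_mark {α : Type} (pd : List (List String))
    (step : List (List String) → α → List (List String)) (C : α → Nat → Nat → Bool) (L : List α)
    (hstep : ∀ g x, x ∈ L → Shp pd g →
      Shp pd (step g x) ∧ ∀ a b, gget (step g x) a b = if C x a b then "#" else gget g a b) :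
    ∀ g, Shp pd g → Shp pd (L.foldl step g) ∧
      ∀ a b, gget (L.foldl step g) a b = if L.any (fun x => C x a b) then "#" else gget g a b := by
  induction L with
  | nil => intro g hg; exact ⟨hg, fun a b => by simp⟩
  | cons x L ih =>
    intro g hg
    obtain ⟨hs, hv⟩ := hstep g x (by simp) hg
    obtain ⟨hs', hv'⟩ := ih (fun g' x' hx' hg' => hstep g' x' (by simp [hx']) hg') (step g x) hs
    refine ⟨by simpa using hs', fun a b => ?_⟩
    rw [List.foldl_cons, hv' a b, hv a b, List.any_cons]
    by_cases h1 : C x a b = true <;> by_cases h2 : L.any (fun x => C x a b) = true <;> simp [h1, h2]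

lemma pyGet2_eq_gget (g : List (List String)) (i j : Int) (h0 : 0 ≤ i) (h2 : 0 ≤ j) :
    PySem.List.pyGetD (PySem.List.pyGetD g i []) j "" = gget g i.toNat j.toNat := by
  rw [PySem.List.pyGetD_of_nonneg g [] h0, PySem.List.pyGetD_of_nonneg _ "" h2]; rfl

lemma getD_eq_getElem' {α : Type} (l : List α) (d : α) (n : Nat) (h : n < l.length) :
    l.getD n d = l[n] := by
  rw [List.getD_eq_getElem?_getD, List.getElem?_eq_getElem h]; rfl

lemma gget_mark (g : List (List String)) (p q : Nat) (hp : p < g.length)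
    (hq : q < (g.getD p []).length) (a b : Nat) :
    gget (g.modify p (fun row => row.set q "#")) a b =
      if a = p ∧ b = q then "#" else gget g a b := by
  have hq' : q < (g[p]'hp).length := by rwa [getD_eq_getElem' g [] p hp] at hq
  by_cases hap : a = p
  · subst hap
    have h1 : (g.modify a (fun row => row.set q "#"))[a]? = some ((g[a]'hp).set q "#") := by
      rw [List.getElem?_modify]; simp [List.getElem?_eq_getElem hp]
    have hrow : (g.modify a (fun row => row.set q "#")).getD a [] = (g[a]'hp).set q "#" := by
      rw [List.getD_eq_getElem?_getD, h1]; rfl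
    unfold gget
    rw [hrow, List.getD_eq_getElem?_getD, List.getElem?_set]
    by_cases hbq : b = q
    · subst hbq; simp [hq']
    · rw [if_neg (by omega), getD_eq_getElem' g [] a hp, List.getD_eq_getElem?_getD]
      simp [hbq]
  · have hpa : p ≠ a := fun h => hap h.symm
    have h1 : (g.modify p (fun row => row.set q "#"))[a]? = g[a]? := by
      simp [hpa]
    have hrow : (g.modify p (fun row => row.set q "#")).getD a [] = g.getD a [] := by
      rw [List.getD_eq_getElem?_getD, h1, List.getD_eq_getElem?_getD]
    unfold gget
    rw [hrow, if_neg (by omega)]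

lemma Shp_mark (pd g : List (List String)) (p q : Nat) (hg : Shp pd g) :
    Shp pd (g.modify p (fun row => row.set q "#")) := by
  obtain ⟨h1, h2⟩ := hg
  refine ⟨by simpa using h1, fun k => ?_⟩
  by_cases hk : k < g.length
  · by_cases hkp : k = p
    · subst hkp
      have e : (g.modify k (fun row => row.set q "#"))[k]? = some ((g[k]'hk).set q "#") := by
        rw [List.getElem?_modify]; simp [List.getElem?_eq_getElem hk]
      have hrow : (g.modify k (fun row => row.set q "#")).getD k [] = (g[k]'hk).set q "#" := by
        rw [List.getD_eq_getElem?_getD, e]; rfl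
      rw [hrow, List.length_set, ← getD_eq_getElem' g [] k hk]
      exact h2 k
    · have hpk : p ≠ k := fun h => hkp h.symm
      have e : (g.modify p (fun row => row.set q "#"))[k]? = g[k]? := by
        simp [hpk]
      have hrow : (g.modify p (fun row => row.set q "#")).getD k [] = g.getD k [] := by
        rw [List.getD_eq_getElem?_getD, e, List.getD_eq_getElem?_getD]
      rw [hrow]
      exact h2 k
  · have e1 : (g.modify p (fun row => row.set q "#"))[k]? = none := by
      apply List.getElem?_eq_none; simpa using Nat.le_of_not_lt hk
    have e2 : g[k]? = none := List.getElem?_eq_none (Nat.le_of_not_lt hk)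
    have e3 : pd[k]? = none := List.getElem?_eq_none (by omega)
    rw [List.getD_eq_getElem?_getD, e1, List.getD_eq_getElem?_getD, e3]

-- ==== grid-only versions of A's four nested loops ====

def gstepY (pd : List (List String)) (i j x : Int) (g : List (List String)) (y : Int) :
    List (List String) :=
  if 0 ≤ i + x ∧ i + x < (pd.length : Int) ∧ 0 ≤ j + y ∧ j + y < (tcW pd : Int) then
    if PySem.List.pyGetD (PySem.List.pyGetD g (i + x) []) (j + y) "" ≠ "#" then
      g.modify (i + x).toNat (fun row => row.set (j + y).toNat "#")
    else g
  else g

def gstepX (pd : List (List String)) (r i j : Int) (g : List (List String)) (x : Int) :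
    List (List String) :=
  (PySem.List.pyRange (-r) (r + 1) 1).foldl (gstepY pd i j x) g

def gstepJ (pd : List (List String)) (r i : Int) (g : List (List String)) (j : Int) :
    List (List String) :=
  if PySem.List.pyGetD (PySem.List.pyGetD pd i []) j "" = "#" then
    (PySem.List.pyRange (-r) (r + 1) 1).foldl (gstepX pd r i j) g
  else g

def gstepI (pd : List (List String)) (r : Int) (g : List (List String)) (i : Int) :
    List (List String) :=
  (PySem.List.pyRange 0 (tcW pd : Int) 1).foldl (gstepJ pd r i) g

def gridA (pd : List (List String)) (r : Int) : List (List String) :=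
  (PySem.List.pyRange 0 (pd.length : Int) 1).foldl (gstepI pd r) pd

lemma width_eq (pd : List (List String)) :
    (if pd.length > 0 then ((PySem.List.pyGetD pd 0 []).length : Int) else 0) = (tcW pd : Int) := by
  cases pd with
  | nil => simp [tcW]
  | cons h t => simp [tcW, PySem.List.pyGetD_zero_cons]

lemma A_eq_gridA (pd : List (List String)) (r : Int) :
    thicken_collision_points pd r = gridA pd r := by
  unfold thicken_collision_points gridA
  simp only [width_eq]
  rw [foldl_fst _ _ (gstepI pd r) ?_ (pd, (0 : Int))]
  intro st i
  unfold gstepI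
  rw [foldl_fst _ _ (gstepJ pd r i) ?_ st]
  intro st j
  unfold gstepJ
  by_cases hc : PySem.List.pyGetD (PySem.List.pyGetD pd i []) j "" = "#"
  · rw [if_pos hc, if_pos hc]
    rw [foldl_fst _ _ (gstepX pd r i j) ?_ st]
    intro st x
    unfold gstepX
    rw [foldl_fst _ _ (gstepY pd i j x) ?_ st]
    intro st y
    unfold gstepY
    split_ifs <;> rfl
  · rw [if_neg hc, if_neg hc]

-- per-level loop conditions for A
def tcCY (pd : List (List String)) (i j x y : Int) (a b : Nat) : Bool :=
  decide (0 ≤ i + x ∧ i + x < (pd.length : Int) ∧ 0 ≤ j + y ∧ j + y < (tcW pd : Int) ∧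
    (a : Int) = i + x ∧ (b : Int) = j + y)

def tcCX (pd : List (List String)) (r i j x : Int) (a b : Nat) : Bool :=
  (PySem.List.pyRange (-r) (r + 1) 1).any (fun y => tcCY pd i j x y a b)

def tcCJ (pd : List (List String)) (r i j : Int) (a b : Nat) : Bool :=
  decide (PySem.List.pyGetD (PySem.List.pyGetD pd i []) j "" = "#") &&
    (PySem.List.pyRange (-r) (r + 1) 1).any (fun x => tcCX pd r i j x a b)

def tcCI (pd : List (List String)) (r i : Int) (a b : Nat) : Bool :=
  (PySem.List.pyRange 0 (tcW pd : Int) 1).any (fun j => tcCJ pd r i j a b)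

lemma row_ge (pd : List (List String)) (hpre : ∀ row ∈ pd, tcW pd ≤ row.length)
    (k : Nat) (hk : k < pd.length) : tcW pd ≤ (pd.getD k []).length := by
  rw [getD_eq_getElem' pd [] k hk]
  exact hpre _ (List.getElem_mem hk)

lemma stepY_char (pd : List (List String)) (hpre : ∀ row ∈ pd, tcW pd ≤ row.length)
    (i j x : Int) (g : List (List String)) (y : Int) (hg : Shp pd g) :
    Shp pd (gstepY pd i j x g y) ∧ ∀ a b,
      gget (gstepY pd i j x g y) a b = if tcCY pd i j x y a b then "#" else gget g a b := by
  unfold gstepY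
  by_cases hb : 0 ≤ i + x ∧ i + x < (pd.length : Int) ∧ 0 ≤ j + y ∧ j + y < (tcW pd : Int)
  · rw [if_pos hb]
    obtain ⟨b1, b2, b3, b4⟩ := hb
    have hglen : g.length = pd.length := hg.1
    have hp : (i + x).toNat < g.length := by omega
    have hrow := hg.2 (i + x).toNat
    have hge := row_ge pd hpre (i + x).toNat (by omega)
    have hq : (j + y).toNat < (g.getD (i + x).toNat []).length := by omega
    by_cases hc : PySem.List.pyGetD (PySem.List.pyGetD g (i + x) []) (j + y) "" ≠ "#"
    · rw [if_pos hc]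
      refine ⟨Shp_mark pd g _ _ hg, fun a b => ?_⟩
      rw [gget_mark g _ _ hp hq a b]
      unfold tcCY
      simp only [decide_eq_true_eq]
      exact if_congr (by constructor <;> intro <;> omega) rfl rfl
    · rw [if_neg hc]
      rw [not_not] at hc
      rw [pyGet2_eq_gget g (i + x) (j + y) b1 b3] at hc
      refine ⟨hg, fun a b => ?_⟩
      unfold tcCY
      simp only [decide_eq_true_eq]
      by_cases hco : (a : Int) = i + x ∧ (b : Int) = j + y
      · have hab : a = (i + x).toNat ∧ b = (j + y).toNat := by omega
        rw [if_pos ⟨b1, b2, b3, b4, hco.1, hco.2⟩, hab.1, hab.2, hc]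
      · rw [if_neg (by tauto)]
  · rw [if_neg hb]
    refine ⟨hg, fun a b => ?_⟩
    unfold tcCY
    simp only [decide_eq_true_eq]
    rw [if_neg (by tauto)]

lemma stepX_char (pd : List (List String)) (hpre : ∀ row ∈ pd, tcW pd ≤ row.length)
    (r i j : Int) (g : List (List String)) (x : Int) (hg : Shp pd g) :
    Shp pd (gstepX pd r i j g x) ∧ ∀ a b,
      gget (gstepX pd r i j g x) a b = if tcCX pd r i j x a b then "#" else gget g a b := by
  exact foldl_mark pd (gstepY pd i j x) (fun y a b => tcCY pd i j x y a b) _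
    (fun g' y _ hg' => stepY_char pd hpre i j x g' y hg') g hg

lemma stepJ_char (pd : List (List String)) (hpre : ∀ row ∈ pd, tcW pd ≤ row.length)
    (r i : Int) (g : List (List String)) (j : Int) (hg : Shp pd g) :
    Shp pd (gstepJ pd r i g j) ∧ ∀ a b,
      gget (gstepJ pd r i g j) a b = if tcCJ pd r i j a b then "#" else gget g a b := by
  unfold gstepJ
  by_cases hc : PySem.List.pyGetD (PySem.List.pyGetD pd i []) j "" = "#"
  · rw [if_pos hc]
    obtain ⟨hs, hv⟩ := foldl_mark pd (gstepX pd r i j) (fun x a b => tcCX pd r i j x a b) _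
      (fun g' x _ hg' => stepX_char pd hpre r i j g' x hg') g hg
    refine ⟨hs, fun a b => ?_⟩
    rw [hv a b]
    unfold tcCJ
    rw [decide_eq_true hc, Bool.true_and]
  · rw [if_neg hc]
    refine ⟨hg, fun a b => ?_⟩
    unfold tcCJ
    rw [decide_eq_false hc, Bool.false_and]
    simp

lemma stepI_char (pd : List (List String)) (hpre : ∀ row ∈ pd, tcW pd ≤ row.length)
    (r : Int) (g : List (List String)) (i : Int) (hg : Shp pd g) :
    Shp pd (gstepI pd r g i) ∧ ∀ a b,
      gget (gstepI pd r g i) a b = if tcCI pd r i a b then "#" else gget g a b := by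
  exact foldl_mark pd (gstepJ pd r i) (fun j a b => tcCJ pd r i j a b) _
    (fun g' j _ hg' => stepJ_char pd hpre r i g' j hg') g hg

lemma condA_eq (pd : List (List String)) (r : Int) (a b : Nat) :
    (PySem.List.pyRange 0 (pd.length : Int) 1).any (fun i => tcCI pd r i a b) =
      tcCond pd r a b := by
  rw [Bool.eq_iff_iff]
  unfold tcCond
  simp only [tcCI, tcCJ, tcCX, tcCY, List.any_eq_true, PySem.List.mem_pyRange_one,
    Bool.and_eq_true, decide_eq_true_eq, hitNearB_iff]
  constructor
  · rintro ⟨i, ⟨hi0, hiH⟩, j, ⟨hj0, hjW⟩, hsrc, x, ⟨hx0, hx1⟩, y, ⟨hy0, hy1⟩,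
      nb1, nb2, nb3, nb4, hae, hbe⟩
    rw [pyGet2_eq_gget pd i j hi0 hj0] at hsrc
    refine ⟨⟨by omega, by omega⟩, i.toNat, j.toNat, by omega, by omega, ?_, by omega, by omega,
      by omega, by omega⟩
    exact hsrc
  · rintro ⟨⟨haH, hbW⟩, p, q, hp, hq, hsrc, h1, h2, h3, h4⟩
    refine ⟨(p : Int), ⟨by omega, by omega⟩, (q : Int), ⟨by omega, by omega⟩, ?_,
      (a : Int) - p, ⟨by omega, by omega⟩, (b : Int) - q, ⟨by omega, by omega⟩,
      by omega, by omega, by omega, by omega, by omega, by omega⟩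
    rw [pyGet2_eq_gget pd p q (by omega) (by omega)]
    simpa using hsrc

-- characterization of port A
lemma A_char (pd : List (List String)) (r : Int)
    (hpre : ∀ row ∈ pd, tcW pd ≤ row.length) :
    Shp pd (thicken_collision_points pd r) ∧
      ∀ a b, gget (thicken_collision_points pd r) a b =
        if tcCond pd r a b then "#" else gget pd a b := by
  rw [A_eq_gridA]
  unfold gridA
  obtain ⟨hs, hv⟩ := foldl_mark pd (gstepI pd r) (fun i a b => tcCI pd r i a b) _
    (fun g' i _ hg' => stepI_char pd hpre r g' i hg') pd ⟨rfl, fun k => rfl⟩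
  exact ⟨hs, fun a b => by rw [hv a b, condA_eq]⟩

-- ==== clean forms of B's two passes ====

def horB (pd : List (List String)) (r : Int) : List (List Bool) :=
  pd.map (fun row =>
    (PySem.List.pyRange 0 (tcW pd : Int) 1).map (fun j =>
      (PySem.List.pyRange (max 0 (j - r)) (min (tcW pd : Int) (j + r + 1)) 1).any
        (fun k => PySem.List.pyGetD row k "" == "#")))

def rowB (pd : List (List String)) (r : Int) (i : Int) (row : List String) : List String :=
  (PySem.List.pyRange 0 (tcW pd : Int) 1).map (fun j =>
    if (PySem.List.pyRange (max 0 (i - r)) (min (pd.length : Int) (i + r + 1)) 1).any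
        (fun k => PySem.List.pyGetD (PySem.List.pyGetD (horB pd r) k []) j false) then "#"
    else PySem.List.pyGetD row j "")

def gridB (pd : List (List String)) (r : Int) : List (List String) :=
  (PySem.List.enumerate pd 0).map (fun p => rowB pd r p.1 p.2)

lemma B_eq_gridB (pd : List (List String)) (r : Int) :
    thicken_collision_points_alt pd r = gridB pd r := by
  unfold thicken_collision_points_alt gridB rowB horB
  simp only [width_eq]

lemma any_pyRange_one (f : Int → Bool) (lo hi : Int) :
    ((PySem.List.pyRange lo hi 1).any f = true) ↔ ∃ k : Int, (lo ≤ k ∧ k < hi) ∧ f k = true := by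
  simp [List.any_eq_true, PySem.List.mem_pyRange_one]

lemma tcCond_iff (pd : List (List String)) (r : Int) (a b : Nat) :
    tcCond pd r a b = true ↔ a < pd.length ∧ b < tcW pd ∧
      ∃ p q : Nat, p < pd.length ∧ q < tcW pd ∧ gget pd p q = "#" ∧
        -r ≤ (a : Int) - p ∧ (a : Int) - p ≤ r ∧ -r ≤ (b : Int) - q ∧ (b : Int) - q ≤ r := by
  unfold tcCond
  simp only [Bool.and_eq_true, decide_eq_true_eq, hitNearB_iff]
  exact and_assoc

lemma pyGetD_row_eq_gget (pd : List (List String)) (p : Nat) (hp : p < pd.length) (q : Int)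
    (hq : 0 ≤ q) : PySem.List.pyGetD (pd[p]'hp) q "" = gget pd p q.toNat := by
  rw [PySem.List.pyGetD_of_nonneg _ "" hq]
  unfold gget
  rw [getD_eq_getElem' pd [] p hp]

lemma horB_get (pd : List (List String)) (r : Int) (p : Nat) (hp : p < pd.length) (b : Nat)
    (hb : b < tcW pd) (hp2 : p < (horB pd r).length) :
    PySem.List.pyGetD ((horB pd r)[p]'hp2) (b : Int) false =
      (PySem.List.pyRange (max 0 ((b : Int) - r)) (min (tcW pd : Int) ((b : Int) + r + 1)) 1).any
        (fun k => PySem.List.pyGetD (pd[p]'hp) k "" == "#") := by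
  have e : (horB pd r)[p]'hp2 = (PySem.List.pyRange 0 (tcW pd : Int) 1).map (fun j =>
      (PySem.List.pyRange (max 0 (j - r)) (min (tcW pd : Int) (j + r + 1)) 1).any
        (fun k => PySem.List.pyGetD (pd[p]'hp) k "" == "#")) := by
    unfold horB
    simp
  rw [e, PySem.List.pyGetD_map_pyRange_of_nonneg _ _ _ _ (by omega) (by exact_mod_cast hb)]

lemma winAny_iff (pd : List (List String)) (r : Int) (a b : Nat)
    (ha : a < pd.length) (hb : b < tcW pd) :
    ((PySem.List.pyRange (max 0 ((a : Int) - r)) (min (pd.length : Int) ((a : Int) + r + 1)) 1).any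
      (fun k => PySem.List.pyGetD (PySem.List.pyGetD (horB pd r) k []) (b : Int) false)) =
      tcCond pd r a b := by
  rw [Bool.eq_iff_iff, tcCond_iff, any_pyRange_one]
  have hhl : (horB pd r).length = pd.length := by simp [horB]
  constructor
  · rintro ⟨k, ⟨hk1, hk2⟩, hk3⟩
    have hk0 : 0 ≤ k := le_trans (le_max_left 0 _) hk1
    have hkH : k.toNat < pd.length := by omega
    have hkH2 : k.toNat < (horB pd r).length := by omega
    rw [PySem.List.pyGetD_of_nonneg _ [] hk0, getD_eq_getElem' _ [] k.toNat hkH2,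
      horB_get pd r k.toNat hkH b hb hkH2, any_pyRange_one] at hk3
    obtain ⟨q, ⟨hq1, hq2⟩, hq3⟩ := hk3
    have hq0 : 0 ≤ q := le_trans (le_max_left 0 _) hq1
    rw [pyGetD_row_eq_gget pd k.toNat hkH q hq0, beq_iff_eq] at hq3
    exact ⟨ha, hb, k.toNat, q.toNat, hkH, by omega, hq3, by omega, by omega, by omega, by omega⟩
  · rintro ⟨_, _, p, q, hp, hq, hsrc, h1, h2, h3, h4⟩
    refine ⟨(p : Int), ⟨by omega, by omega⟩, ?_⟩
    have hp2 : p < (horB pd r).length := by omega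
    have e0 : PySem.List.pyGetD (horB pd r) ((p : Nat) : Int) [] = (horB pd r)[p]'hp2 := by
      rw [PySem.List.pyGetD_natCast, getD_eq_getElem' _ [] p hp2]
    rw [e0, horB_get pd r p hp b hb hp2, any_pyRange_one]
    refine ⟨(q : Int), ⟨by omega, by omega⟩, ?_⟩
    rw [pyGetD_row_eq_gget pd p hp (q : Int) (by omega), beq_iff_eq]
    simpa using hsrc

lemma rowB_get? (pd : List (List String)) (r : Int) (a : Nat) (ha : a < pd.length) :
    (gridB pd r)[a]? = some (rowB pd r (a : Int) (pd[a]'ha)) := by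
  unfold gridB
  rw [List.getElem?_map]
  have he : (PySem.List.enumerate pd 0)[a]? = some ((0 : Int) + a, pd[a]'ha) := by
    have hl : a < (PySem.List.enumerate pd 0).length := by
      rw [PySem.List.length_enumerate]; exact ha
    rw [List.getElem?_eq_getElem hl, PySem.List.getElem_enumerate]
  rw [he]
  simp

lemma len_rowB (pd : List (List String)) (r : Int) (i : Int) (row : List String) :
    (rowB pd r i row).length = tcW pd := by
  unfold rowB
  rw [List.length_map, PySem.List.length_pyRange_one]
  omega

-- characterization of port B
lemma B_char (pd : List (List String)) (r : Int)
    (hrect : ∀ row ∈ pd, row.length = tcW pd) :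
    Shp pd (thicken_collision_points_alt pd r) ∧
      ∀ a b, gget (thicken_collision_points_alt pd r) a b =
        if tcCond pd r a b then "#" else gget pd a b := by
  rw [B_eq_gridB]
  have hlen : (gridB pd r).length = pd.length := by
    unfold gridB
    rw [List.length_map, PySem.List.length_enumerate]
  have hshp : Shp pd (gridB pd r) := by
    refine ⟨hlen, fun k => ?_⟩
    by_cases hk : k < pd.length
    · rw [List.getD_eq_getElem?_getD, rowB_get? pd r k hk, Option.getD_some, len_rowB,
        getD_eq_getElem' pd [] k hk, hrect _ (List.getElem_mem hk)]
    · rw [List.getD_eq_default _ _ (by omega), List.getD_eq_default _ _ (by omega)]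
  refine ⟨hshp, fun a b => ?_⟩
  by_cases haH : a < pd.length
  · have hrowa : (gridB pd r).getD a [] = rowB pd r (a : Int) (pd[a]'haH) := by
      rw [List.getD_eq_getElem?_getD, rowB_get? pd r a haH, Option.getD_some]
    have hrl : (pd[a]'haH).length = tcW pd := hrect _ (List.getElem_mem haH)
    unfold gget
    rw [hrowa, getD_eq_getElem' pd [] a haH]
    unfold rowB
    by_cases hbW : b < tcW pd
    · rw [← PySem.List.pyGetD_natCast,
        PySem.List.pyGetD_map_pyRange_of_nonneg _ _ _ _ (by omega) (by exact_mod_cast hbW)]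
      rw [winAny_iff pd r a b haH hbW]
      by_cases hc : tcCond pd r a b = true
      · rw [if_pos hc, if_pos hc]
      · rw [if_neg hc, if_neg hc, PySem.List.pyGetD_natCast, List.getD_eq_getElem?_getD]
    · have hcf : tcCond pd r a b = false := by
        unfold tcCond
        rw [decide_eq_false hbW]
        simp
      rw [hcf]
      simp only [Bool.false_eq_true, if_false]
      have hl1 : ((PySem.List.pyRange 0 (tcW pd : Int) 1).map (fun j =>
          if (PySem.List.pyRange (max 0 ((a : Int) - r))
                (min (pd.length : Int) ((a : Int) + r + 1)) 1).any
              (fun k => PySem.List.pyGetD (PySem.List.pyGetD (horB pd r) k []) j false) then "#"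
          else PySem.List.pyGetD (pd[a]'haH) j "")).length = tcW pd := by
        rw [List.length_map, PySem.List.length_pyRange_one]; omega
      rw [List.getD_eq_default _ _ (by omega), List.getD_eq_default _ _ (by omega)]
  · unfold gget
    rw [List.getD_eq_default (gridB pd r) _ (by omega), List.getD_eq_default pd _ (by omega)]
    have hcf : tcCond pd r a b = false := by
      unfold tcCond
      rw [decide_eq_false haH]
      simp
    rw [hcf]
    simp

lemma eq_of_shp_gget (pd g1 g2 : List (List String)) (h1 : Shp pd g1) (h2 : Shp pd g2)
    (h : ∀ a b, gget g1 a b = gget g2 a b) : g1 = g2 := by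
  apply List.ext_getElem (h1.1.trans h2.1.symm)
  intro n hn1 hn2
  have hrl : (g1[n]'hn1).length = (g2[n]'hn2).length := by
    have e1 := h1.2 n; have e2 := h2.2 n
    rw [getD_eq_getElem' g1 [] n hn1] at e1
    rw [getD_eq_getElem' g2 [] n hn2] at e2
    omega
  apply List.ext_getElem hrl
  intro m hm1 hm2
  have := h n m
  unfold gget at this
  rwa [getD_eq_getElem' g1 [] n hn1, getD_eq_getElem' g2 [] n hn2,
    getD_eq_getElem' _ "" m hm1, getD_eq_getElem' _ "" m hm2] at this

-- ===== VERDICT (by name: the statement is the Claim_ definition above) =====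
theorem thicken_collision_points_spec : Claim_equal_thicken_collision_points := by
  intro pd r _ hpre
  unfold Spec_thicken_collision_points
  have hrect : ∀ row ∈ pd, row.length = tcW pd := hpre
  have hle : ∀ row ∈ pd, tcW pd ≤ row.length := fun row hm => le_of_eq (hrect row hm).symm
  obtain ⟨hA, hAv⟩ := A_char pd r hle
  obtain ⟨hB, hBv⟩ := B_char pd r hrect
  exact eq_of_shp_gget pd _ _ hA hB (fun a b => by rw [hAv a b, hBv a b])
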